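-- pv_equiv track=rewrite | github.com/mmiliukas/screeners | million.py | calculate_buy_amount
-- ===== SOURCE A (Python) =====
-- def calculate_buy_amount(total):
--     prices = [
--         # [2000, 250],
--         [2540, 317],
--         [3225, 403],
--         [4096, 512],
--         [5202, 650],
--         [6607, 825],
--     ]
--     price = 250
--     for limit, suggested_price in prices:
--         if limit < total:
--             price = suggested_price
--     return price
-- ===== SOURCE B (Python) =====
-- import bisect
--
-- def calculate_buy_amount(total):
--     limits = [2540, 3225, 4096, 5202, 6607]
--     suggested = [317, 403, 512, 650, 825]
--     idx = bisect.bisect_left(limits, total)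
--     return suggested[idx - 1] if idx > 0 else 250
-- ===== Notes on version B (the rewrite author's own statement) =====
-- stated objective: idiomatic
-- what changed: Replaces the forward keep-last linear scan over (limit, price) pairs with a binary search (bisect_left) over the ascending limits, indexing into a parallel suggested-price table falling back to the base price when no limit is below total.
import Mathlib
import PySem

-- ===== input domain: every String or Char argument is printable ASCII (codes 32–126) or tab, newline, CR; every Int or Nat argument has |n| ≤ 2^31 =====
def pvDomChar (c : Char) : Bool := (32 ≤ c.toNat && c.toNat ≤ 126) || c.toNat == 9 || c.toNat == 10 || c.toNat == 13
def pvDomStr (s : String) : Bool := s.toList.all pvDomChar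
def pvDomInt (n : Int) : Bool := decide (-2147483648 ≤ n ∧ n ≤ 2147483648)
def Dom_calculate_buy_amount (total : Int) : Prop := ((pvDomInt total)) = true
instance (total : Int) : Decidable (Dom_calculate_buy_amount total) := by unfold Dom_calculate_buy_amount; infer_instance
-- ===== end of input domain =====

-- B replaces A's keep-last linear scan over price tiers with a bisect_left binary search over the ascending limits (idiomatic; same result).


-- ===== PORT A =====
-- literal transliteration of A: fold over the price table, keeping the last suggested price whose limit < total
def calculate_buy_amount (total : Int) : Int :=
  let prices : List (Int × Int) :=
    [(2540, 317), (3225, 403), (4096, 512), (5202, 650), (6607, 825)]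
  prices.foldl (fun price p => if p.1 < total then p.2 else price) 250

-- ===== PORT B =====
-- literal transliteration of B: bisect_left over the limits, then index the parallel suggested list
def calculate_buy_amount_alt (total : Int) : Int :=
  let limits : List Int := [2540, 3225, 4096, 5202, 6607]
  let suggested : List Int := [317, 403, 512, 650, 825]
  let idx := PySem.List.bisectLeft limits total
  if idx > 0 then suggested.getD (idx - 1) 0 else 250

-- ===== PRECONDITION & SPEC =====
def Spec_calculate_buy_amount (total : Int) (out : Int) : Prop := out = calculate_buy_amount_alt total
instance (total : Int) (out : Int) : Decidable (Spec_calculate_buy_amount total out) := by unfold Spec_calculate_buy_amount; infer_instance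

-- ===== CLAIM (what is proved, stated in full; the proofs are below) =====
def Claim_equal_calculate_buy_amount : Prop := ∀ (total : Int), Dom_calculate_buy_amount total → Spec_calculate_buy_amount total (calculate_buy_amount total)

-- ===== LEMMAS AND PROOFS =====

-- bisect_left on the concrete limits list, characterised as nested comparisons
theorem bisectLeft_limits (x : Int) : PySem.List.bisectLeft [2540, 3225, 4096, 5202, 6607] x =
    if 6607 < x then 5 else if 5202 < x then 4 else if 4096 < x then 3
    else if 3225 < x then 2 else if 2540 < x then 1 else 0 := by
  simp [PySem.List.bisectLeft, PySem.List.bisectLeftLoop]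
  split_ifs <;> omega

-- ===== VERDICT (by name: the statement is the Claim_ definition above) =====
theorem calculate_buy_amount_spec : Claim_equal_calculate_buy_amount := by
  intro total _
  unfold Spec_calculate_buy_amount calculate_buy_amount calculate_buy_amount_alt
  simp only []
  rw [bisectLeft_limits]
  simp only [List.foldl]
  split_ifs <;> simp_all <;> omega
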